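-- pv_equiv track=rewrite | github.com/Shwicky22/Google-Maps | random.py | solution
-- ===== SOURCE A (Python) =====
-- def solution(A):
--     # write your code in Python 3.6
--     count = 0
--     for i in range(len(A)):
--         maximum = max(A[0:i+1])
--         if i != len(A)-1:
--             if maximum < A[i+1]:
--                 count += 1
--
--     return count
-- ===== SOURCE B (Python) =====
-- def solution(A):
--     # Single pass with a running prefix maximum instead of recomputing max(A[0:i+1]) each step.
--     if not A:
--         return 0
--     count = 0
--     m = A[0]
--     for x in A[1:]:
--         if m < x:
--             count += 1
--             m = x
--     return count
-- ===== Notes on version B (the rewrite author's own statement) =====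
-- stated objective: faster
-- what changed: Replaces the per-index recomputation of max(A[0:i+1]) (a full slice scan inside the loop) with a single left-to-right pass maintaining the running prefix maximum.
import Mathlib
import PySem

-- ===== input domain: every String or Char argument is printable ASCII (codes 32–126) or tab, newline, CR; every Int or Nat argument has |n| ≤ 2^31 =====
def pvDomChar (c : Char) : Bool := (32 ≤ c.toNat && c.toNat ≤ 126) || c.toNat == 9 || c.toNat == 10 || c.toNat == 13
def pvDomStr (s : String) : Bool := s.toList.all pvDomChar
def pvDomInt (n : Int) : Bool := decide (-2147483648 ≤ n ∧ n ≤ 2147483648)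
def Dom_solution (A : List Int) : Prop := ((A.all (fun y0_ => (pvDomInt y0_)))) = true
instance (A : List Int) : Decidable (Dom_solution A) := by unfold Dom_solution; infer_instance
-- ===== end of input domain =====

-- B replaces A's per-index recomputation of max(A[0:i+1]) with a single pass keeping a running prefix maximum.

-- ===== PORT A =====
def solution (A : List Int) : Int :=
  (PySem.List.pyRange 0 (A.length : Int) 1).foldl (fun count i =>
    let maximum := (PySem.List.max? (PySem.List.slice A (some 0) (some (i + 1))) (fun y => y)).getD 0
    if i ≠ (A.length : Int) - 1 then
      -- A[i+1] is in range whenever this branch is taken (0 ≤ i < len - 1), so the default is never used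
      if maximum < PySem.List.pyGetD A (i + 1) 0 then count + 1 else count
    else count) 0

-- ===== PORT B =====
def altGo (m count : Int) : List Int → Int
  | [] => count
  | x :: xs => if m < x then altGo x (count + 1) xs else altGo m count xs

def solution_alt (A : List Int) : Int :=
  match A with
  | [] => 0
  | x :: xs => altGo x 0 xs

-- ===== PRECONDITION & SPEC =====
def Spec_solution (A : List Int) (out : Int) : Prop := out = solution_alt A
instance (A : List Int) (out : Int) : Decidable (Spec_solution A out) := by unfold Spec_solution; infer_instance

-- ===== CLAIM (what is proved, stated in full; the proofs are below) =====
def Claim_equal_solution : Prop := ∀ (A : List Int), Dom_solution A → Spec_solution A (solution A)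

-- ===== LEMMAS AND PROOFS =====

-- indicator of A's loop body at index k: counts k when k is not the last index and max A[0:k+1] < A[k+1]
def ind (A : List Int) (k : Nat) : Int :=
  if (k : Int) ≠ (A.length : Int) - 1 ∧
      (PySem.List.max? (A.take (k+1)) (fun y => y)).getD 0 < A.getD (k+1) 0 then 1 else 0

theorem foldl_add_gen (g : Nat → Int) (l : List Nat) (c : Int) :
    l.foldl (fun c k => c + g k) c = c + (l.map g).sum := by
  induction l generalizing c with
  | nil => simp
  | cons x xs ih => simp [ih]; ring

theorem solution_sum (A : List Int) :
    solution A = ((List.range A.length).map (ind A)).sum := by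
  unfold solution
  rw [PySem.List.pyRange_zero_natCast, List.foldl_map]
  have hf : (fun (count : Int) (k : Nat) =>
      let maximum := (PySem.List.max? (PySem.List.slice A (some 0) (some ((k:Int) + 1))) (fun y => y)).getD 0
      if (k:Int) ≠ (A.length : Int) - 1 then
        if maximum < PySem.List.pyGetD A ((k:Int) + 1) 0 then count + 1 else count
      else count) = (fun count k => count + ind A k) := by
    funext c k
    simp only [ind]
    have h1 : ((k:Int) + 1) = ((k+1 : Nat) : Int) := by push_cast; ring
    rw [h1, PySem.List.slice_zero_start, PySem.List.slice_to_natCast, PySem.List.pyGetD_natCast]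
    split_ifs with hp hq h1 h2 h3
    · rfl
    · exact absurd ⟨hp, hq⟩ h1
    · exact absurd h2.2 hq
    · ring
    · exact absurd h3.1 hp
    · ring
  rw [hf, foldl_add_gen, zero_add]

theorem ind_last_zero (A : List Int) {m : Nat} (h : A.length = m + 1) : ind A m = 0 := by
  unfold ind
  rw [if_neg]
  intro hc
  exact hc.1 (by rw [h]; push_cast; ring)

theorem solution_singleton (y : Int) : solution [y] = 0 := by
  rw [solution_sum]; simp [ind]

theorem solution_snoc (x : Int) (xs : List Int) (y : Int) :
    solution ((x :: xs) ++ [y]) =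
      solution (x :: xs) + (if xs.foldl max x < y then 1 else 0) := by
  set A := x :: xs with hA
  set B := (x :: xs) ++ [y] with hB
  set m := xs.length with hm
  have hAl : A.length = m + 1 := by simp [hA, hm]
  have hBl : B.length = m + 2 := by simp [hB, hm]
  rw [solution_sum, solution_sum, hAl, hBl]
  rw [List.range_succ, List.map_append, List.sum_append,
      List.range_succ, List.map_append, List.sum_append,
      List.map_append, List.sum_append]
  have h1 : ind B (m + 1) = 0 := ind_last_zero B hBl
  have h2 : ind A m = 0 := ind_last_zero A hAl
  have h3 : ind B m = (if xs.foldl max x < y then 1 else 0) := by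
    unfold ind
    have htake : B.take (m + 1) = A := by
      rw [hB, ← hAl, List.take_left]
    have hget : B.getD (m + 1) 0 = y := by
      rw [List.getD_eq_getElem?_getD, hB, ← hAl, List.getElem?_concat_length]
      rfl
    rw [htake, hget, hBl, hA, PySem.List.max?_id_cons]
    have c1 : ¬((m : Int) = (m : Int) + 2 - 1) := by omega
    simp [c1]
  have h4 : ∀ k ∈ List.range m, ind B k = ind A k := by
    intro k hk
    have hkm : k < m := List.mem_range.mp hk
    unfold ind
    have htake : B.take (k + 1) = A.take (k + 1) := by
      rw [hB, List.take_append_of_le_length (by rw [← hA, hAl]; omega)]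
    have hget : B.getD (k + 1) 0 = A.getD (k + 1) 0 := by
      rw [List.getD_eq_getElem?_getD, List.getD_eq_getElem?_getD, hB,
          List.getElem?_append_left (by rw [← hA, hAl]; omega)]
    rw [htake, hget, hBl, hAl]
    have c1 : ¬((k : Int) = (m : Int) + 2 - 1) := by omega
    have c2 : ¬(k = m) := by omega
    simp [c1, c2]
  rw [List.map_congr_left h4]
  simp only [List.map_cons, List.map_nil, List.sum_cons, List.sum_nil, h1, h2, h3]
  ring

theorem altGo_snoc (xs : List Int) (m c y : Int) :
    altGo m c (xs ++ [y]) = altGo m c xs + (if xs.foldl max m < y then 1 else 0) := by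
  induction xs generalizing m c with
  | nil =>
      simp only [List.nil_append, List.foldl_nil]
      split_ifs with h
      · simp [altGo, h]
      · simp [altGo, h]
  | cons x xs ih =>
      simp only [List.cons_append, altGo, List.foldl_cons]
      by_cases h : m < x
      · simp [h, ih, max_eq_right (le_of_lt h)]
      · simp [h, ih, max_eq_left (le_of_not_gt h)]

theorem solution_main (A : List Int) : solution A = solution_alt A := by
  induction A using List.reverseRecOn with
  | nil => rfl
  | append_singleton A y ih =>
      cases A with
      | nil => simpa [solution_alt, altGo] using solution_singleton y
      | cons x xs =>
          rw [solution_snoc, ih]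
          simp [solution_alt, altGo_snoc]

-- ===== VERDICT (by name: the statement is the Claim_ definition above) =====
theorem solution_spec : Claim_equal_solution := by
  intro A _
  unfold Spec_solution
  exact solution_main A
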